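-- pv_equiv track=rewrite | github.com/tituslhy/Skimlit | utils/utils.py | return_text
-- ===== SOURCE A (Python) =====
-- from collections import defaultdict
--
-- def return_text(sentence_labels: list,
--                 abstract_lines: list):
--     """Returns a skimmable summary
--
--     Args:
--         sentence_labels (list): List of model predicted labels for each sentence
--         abstract_lines (list): List of parsed sentences from abstract
--     """
--     compile = defaultdict(list)
--     for idx, sentence in enumerate(abstract_lines):
--         compile[sentence_labels[idx]].append(sentence)
--     for label in compile:
--         compile[label] = ' '.join(compile[label])
--     text = ''
--     for summary in compile:
--         if len(text)==0:
--             text += '__'+ summary + '__ : ' + compile[summary] + '  '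
--         else:
--             text += '\n__'+ summary + '__ : ' + compile[summary] + '  '
--     return text
-- ===== SOURCE B (Python) =====
-- def return_text(sentence_labels: list,
--                 abstract_lines: list):
--     """Returns a skimmable summary (label-driven repeated-scan re-implementation)."""
--     pairs = [(sentence_labels[i], abstract_lines[i]) for i in range(len(abstract_lines))]
--     labels = list(dict.fromkeys(l for l, _ in pairs))
--     parts = []
--     for lab in labels:
--         joined = ' '.join(s for l, s in pairs if l == lab)
--         parts.append('__' + lab + '__ : ' + joined + '  ')
--     return '\n'.join(parts)
-- ===== Notes on version B (the rewrite author's own statement) =====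
-- stated objective: alternative
-- what changed: Replaces A's single-pass defaultdict grouping plus incremental length-tested string accumulation with a label-driven design: pair labels with sentences by index, compute the ordered distinct labels, do one filtering pass per label, and assemble the result with str.join.
import Mathlib
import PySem

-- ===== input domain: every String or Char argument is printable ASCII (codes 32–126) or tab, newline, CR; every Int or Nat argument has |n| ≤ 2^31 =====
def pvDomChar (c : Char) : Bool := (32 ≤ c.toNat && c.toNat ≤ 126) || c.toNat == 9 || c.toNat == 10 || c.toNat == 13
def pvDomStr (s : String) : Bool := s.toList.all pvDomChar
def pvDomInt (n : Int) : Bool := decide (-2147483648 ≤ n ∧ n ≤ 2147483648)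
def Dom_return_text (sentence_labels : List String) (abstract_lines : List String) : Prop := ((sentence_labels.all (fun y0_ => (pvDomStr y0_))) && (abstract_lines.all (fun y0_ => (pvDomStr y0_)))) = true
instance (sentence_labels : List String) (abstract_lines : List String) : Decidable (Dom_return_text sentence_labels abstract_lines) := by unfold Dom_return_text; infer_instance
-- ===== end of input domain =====

-- B regroups A's single-pass defaultdict accumulation as a label-driven traversal: index-built
-- (label, sentence) pairs, ordered distinct labels, one filtering pass per label, joined with '\n'
-- (objective: alternative).

-- ===== PORT A =====
-- the three loops of A: defaultdict grouping (modify with default [] = defaultdict(list)),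
-- re-assignment of each value to its ' '-join (Python mutates the dict in place, changing the
-- value type from list to str; ported as building a second dict over the same keys in order),
-- and the length-tested string accumulation.  sentence_labels[idx] is pyGet?; none = IndexError,
-- excluded by Pre_return_text.
def return_text (sentence_labels : List String) (abstract_lines : List String) : String :=
  let compile : PySem.Dict String (List String) :=
    (PySem.List.enumerate abstract_lines).foldl
      (fun d p => d.modify ((PySem.List.pyGet? sentence_labels p.1).getD "") [] (fun v => v ++ [p.2]))
      PySem.Dict.empty
  let compile2 : PySem.Dict String String :=
    compile.keys.foldl (fun d k => d.insert k (PySem.Str.join " " (compile.getD k []))) PySem.Dict.empty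
  compile2.items.foldl
    (fun text p =>
      if PySem.Str.len text == 0 then text ++ ("__" ++ p.1 ++ "__ : " ++ p.2 ++ "  ")
      else text ++ ("\n" ++ "__" ++ p.1 ++ "__ : " ++ p.2 ++ "  "))
    ""

-- ===== PORT B =====
-- Source B: build (label, sentence) pairs by indexing over range(len(abstract_lines))
-- (sentence_labels[i] raises IndexError exactly as A does when the labels run short; pyGetD is
-- exact under Pre_return_text), dedup the labels (dict.fromkeys = PySem.List.dedup), one filter
-- pass per label, and a final '\n'-join.
def return_text_alt (sentence_labels : List String) (abstract_lines : List String) : String :=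
  let pairs := (PySem.List.pyRange 0 abstract_lines.length 1).map
    (fun i => (PySem.List.pyGetD sentence_labels i "", PySem.List.pyGetD abstract_lines i ""))
  let labels := PySem.List.dedup (pairs.map Prod.fst)
  PySem.Str.join "\n" (labels.map (fun lab =>
    "__" ++ lab ++ "__ : " ++
      PySem.Str.join " " ((pairs.filter (fun p => p.1 == lab)).map Prod.snd) ++ "  "))

-- ===== PRECONDITION & SPEC =====
-- A (and B) raise IndexError when abstract_lines is longer than sentence_labels; exactly those
-- inputs are excluded.
def Pre_return_text (sentence_labels : List String) (abstract_lines : List String) : Prop :=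
  abstract_lines.length ≤ sentence_labels.length
instance (sentence_labels : List String) (abstract_lines : List String) : Decidable (Pre_return_text sentence_labels abstract_lines) := by unfold Pre_return_text; infer_instance
def pvWitness_return_text : List String × List String := (["A", "B", "A"], ["x", "y", "z"])

def Spec_return_text (sentence_labels : List String) (abstract_lines : List String) (out : String) : Prop := out = return_text_alt sentence_labels abstract_lines
instance (sentence_labels : List String) (abstract_lines : List String) (out : String) : Decidable (Spec_return_text sentence_labels abstract_lines out) := by unfold Spec_return_text; infer_instance

-- ===== CLAIM (what is proved, stated in full; the proofs are below) =====
def Claim_equal_return_text : Prop := ∀ (sentence_labels : List String) (abstract_lines : List String), Dom_return_text sentence_labels abstract_lines → Pre_return_text sentence_labels abstract_lines → Spec_return_text sentence_labels abstract_lines (return_text sentence_labels abstract_lines)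

-- ===== LEMMAS AND PROOFS =====

-- Reading sentence_labels[idx] over enumerate abstract_lines is zipping, given enough labels.
theorem pv_map_enum (sl al : List String) (s : Nat) (h : s + al.length ≤ sl.length) :
    (PySem.List.enumerate al (s : Int)).map
      (fun p => (((PySem.List.pyGet? sl p.1).getD ""), p.2)) = (sl.drop s).zip al := by
  induction al generalizing s with
  | nil => simp [PySem.List.enumerate_nil]
  | cons x al ih =>
    have hs : s < sl.length := by simp at h; omega
    rw [PySem.List.enumerate_cons, List.map_cons]
    have hc : ((s : Int) + 1) = ((s + 1 : Nat) : Int) := by push_cast; ring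
    rw [hc, ih (s+1) (by simp at h ⊢; omega), List.drop_eq_getElem_cons hs, List.zip_cons_cons]
    simp [hs]

-- B's index-built pairs are the zip, given enough labels.
theorem pv_pairs_zip (sl al : List String) (h : al.length ≤ sl.length) :
    (PySem.List.pyRange 0 al.length 1).map
      (fun i => (PySem.List.pyGetD sl i "", PySem.List.pyGetD al i "")) = sl.zip al := by
  rw [PySem.List.pyRange_one, List.map_map]
  apply List.ext_getElem
  · simp; omega
  · intro k h1 h2
    have hk : k < al.length := by simpa using h1
    have hsl := PySem.List.pyGetD_eq_getElem sl (i := 0 + (k:Int)) ""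
            (by omega) (by push_cast; omega)
    have hal := PySem.List.pyGetD_eq_getElem al (i := 0 + (k:Int)) ""
            (by omega) (by push_cast; omega)
    simp only [show ((0:Int) + (k:Int)).toNat = k by omega] at hsl hal
    simp [Function.comp, hsl, hal, List.getElem?_eq_getElem (show k < sl.length by omega),
          List.getElem?_eq_getElem hk]

-- A's third loop in closed form
def pvPart (p : String × String) : String := "__" ++ p.1 ++ "__ : " ++ p.2 ++ "  "

def pvStep (text : String) (p : String × String) : String :=
  if PySem.Str.len text == 0 then text ++ ("__" ++ p.1 ++ "__ : " ++ p.2 ++ "  ")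
  else text ++ ("\n" ++ "__" ++ p.1 ++ "__ : " ++ p.2 ++ "  ")

theorem pvStep_of_ne (t : String) (p : String × String) (h : t.toList ≠ []) :
    pvStep t p = t ++ "\n" ++ pvPart p := by
  unfold pvStep pvPart
  rw [if_neg]
  · apply String.toList_inj.mp; simp
  · simp [PySem.Str.len_eq]
    exact fun he => h (by simp [he])

theorem pvStep_toList_ne (t : String) (p : String × String) :
    (pvStep t p).toList ≠ [] := by
  unfold pvStep
  split <;> simp

theorem pv_foldl_aux (l : List (String × String)) (t : String) (h : t.toList ≠ []) :
    l.foldl pvStep t = t ++ (l.map (fun p => "\n" ++ pvPart p)).foldr (· ++ ·) "" := by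
  induction l generalizing t with
  | nil => apply String.toList_inj.mp; simp
  | cons q l ih =>
    rw [List.foldl_cons, ih _ (pvStep_toList_ne t q), pvStep_of_ne t q h]
    apply String.toList_inj.mp; simp

theorem pv_join_cons (q : String) (xs : List String) :
    PySem.Str.join "\n" (q :: xs) = q ++ (xs.map (fun s => "\n" ++ s)).foldr (· ++ ·) "" := by
  induction xs generalizing q with
  | nil =>
    apply String.toList_inj.mp
    simp [PySem.Str.toList_join, PySem.Chars.join_singleton]
  | cons x xs ih =>
    apply String.toList_inj.mp
    rw [PySem.Str.toList_join, List.map_cons, List.map_cons, PySem.Chars.join_cons_cons]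
    have := congrArg String.toList (ih x)
    rw [PySem.Str.toList_join] at this
    simp at this ⊢
    simp [this]

-- A's accumulation loop IS a '\n'-join of the formatted items
theorem pv_fold_join (l : List (String × String)) :
    l.foldl pvStep "" = PySem.Str.join "\n" (l.map pvPart) := by
  cases l with
  | nil => rfl
  | cons q l =>
    rw [List.foldl_cons, List.map_cons, pv_join_cons]
    have h1 : pvStep "" q = pvPart q := by
      unfold pvStep pvPart
      rw [if_pos (by simp [PySem.Str.len_eq])]
      apply String.toList_inj.mp; simp
    rw [h1, pv_foldl_aux l (pvPart q) (by unfold pvPart; simp), List.map_map]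
    rfl

theorem pv_main (sl al : List String) (hpre : al.length ≤ sl.length) :
    return_text sl al = return_text_alt sl al := by
  unfold return_text return_text_alt
  dsimp only
  have hz : (PySem.List.enumerate al).map
      (fun p => (((PySem.List.pyGet? sl p.1).getD ""), p.2)) = sl.zip al := by
    have := pv_map_enum sl al 0 (by omega)
    simpa using this
  have henum : (PySem.List.enumerate al).foldl
      (fun d p => d.modify ((PySem.List.pyGet? sl p.1).getD "") [] (fun v => v ++ [p.2]))
      PySem.Dict.empty
      = (sl.zip al).foldl (fun d p => d.modify p.1 [] (fun v => v ++ [p.2])) PySem.Dict.empty := by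
    rw [← hz, List.foldl_map]
  rw [henum, pv_pairs_zip sl al hpre]
  set cg := (sl.zip al).foldl (fun d p => d.modify p.1 [] (fun v => v ++ [p.2])) PySem.Dict.empty with hcg
  have hkeys : cg.keys = PySem.Set.ofList ((sl.zip al).map (fun p => p.1)) := by
    rw [hcg, PySem.Dict.keys_foldl_modify_key (sl.zip al) (fun p => p.1) [] (fun _ p => fun v => v ++ [p.2]) PySem.Dict.empty]
    rfl
  have hnd : cg.keys.Nodup := by
    rw [hcg]
    exact PySem.Dict.nodup_keys_foldl_modify_key _ _ _ _ _ (by simp [PySem.Dict.empty])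
  have hget : ∀ c, cg.getD c [] = ((sl.zip al).filter (fun p => p.1 == c)).map (fun p => p.2) := by
    intro c
    rw [hcg, PySem.Dict.getD_foldl_modify_append]
    rfl
  have hitems : (cg.keys.foldl (fun d k => d.insert k (PySem.Str.join " " (cg.getD k []))) PySem.Dict.empty).items
      = cg.keys.map (fun k => (k, PySem.Str.join " " (cg.getD k []))) := by
    rw [PySem.Dict.items_foldl_insert_fresh cg.keys (fun a => a)
        (fun k => PySem.Str.join " " (cg.getD k [])) PySem.Dict.empty
        (by intro a _; rfl) (by simpa using hnd)]
    simp [PySem.Dict.empty]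
  rw [hitems]
  rw [show (fun (text : String) (p : String × String) =>
      if PySem.Str.len text == 0 then text ++ ("__" ++ p.1 ++ "__ : " ++ p.2 ++ "  ")
      else text ++ ("\n" ++ "__" ++ p.1 ++ "__ : " ++ p.2 ++ "  ")) = pvStep from rfl]
  rw [pv_fold_join, List.map_map, PySem.List.dedup_eq_ofList, ← hkeys]
  congr 1
  apply List.map_congr_left
  intro k _
  simp [Function.comp, pvPart, hget k]

-- ===== VERDICT (by name: the statement is the Claim_ definition above) =====
theorem return_text_spec : Claim_equal_return_text := by
  intro sl al _ hpre
  unfold Spec_return_text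
  exact pv_main sl al hpre
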